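-- pv_equiv track=rewrite | github.com/LKONDETI/codepath-sept-nov2024 | day2.py | num_VIP_guests
-- ===== SOURCE A (Python) =====
-- def num_VIP_guests(vip_passes, guests):
--     vip_set = set()
--     count = 0
--     for char in vip_passes:
--         vip_set.add(char)
--     for i in guests:
--         if i in vip_set:
--             count += 1
--     return count
-- ===== SOURCE B (Python) =====
-- def num_VIP_guests(vip_passes, guests):
--     counts = {}
--     for g in guests:
--         counts[g] = counts.get(g, 0) + 1
--     total = 0
--     seen = set()
--     for p in vip_passes:
--         if p not in seen:
--             seen.add(p)
--             total += counts.get(p, 0)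
--     return total
-- ===== Notes on version B (the rewrite author's own statement) =====
-- stated objective: alternative
-- what changed: B builds a frequency table of the guests once and then iterates over the distinct VIP passes summing guest tallies, instead of A's pass over guests testing membership in a VIP set.
import Mathlib
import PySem

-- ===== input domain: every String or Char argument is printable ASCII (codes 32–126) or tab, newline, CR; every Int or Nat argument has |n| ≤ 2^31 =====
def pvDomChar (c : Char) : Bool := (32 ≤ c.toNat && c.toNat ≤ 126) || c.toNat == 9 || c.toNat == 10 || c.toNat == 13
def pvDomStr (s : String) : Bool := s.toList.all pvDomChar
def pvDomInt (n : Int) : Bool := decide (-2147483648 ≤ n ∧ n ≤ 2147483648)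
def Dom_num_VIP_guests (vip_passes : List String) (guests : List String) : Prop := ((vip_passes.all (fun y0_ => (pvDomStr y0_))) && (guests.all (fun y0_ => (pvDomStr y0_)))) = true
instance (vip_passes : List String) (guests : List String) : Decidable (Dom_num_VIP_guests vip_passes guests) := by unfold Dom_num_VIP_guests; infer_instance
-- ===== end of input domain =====

-- B builds a guest frequency table once, then sums tallies over the distinct VIP passes
-- (alternative decomposition; A instead scans guests testing membership in a VIP set).

-- ===== PORT A =====
def num_VIP_guests (vip_passes : List String) (guests : List String) : Int :=
  let vip_set : PySem.Set String := vip_passes.foldl PySem.Set.add PySem.Set.empty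
  guests.foldl (fun count i => if PySem.Set.contains vip_set i then count + 1 else count) 0

-- ===== PORT B =====
def num_VIP_guests_alt (vip_passes : List String) (guests : List String) : Int :=
  let counts : PySem.Dict String Int :=
    guests.foldl (fun d g => d.insert g (d.getD g 0 + 1)) PySem.Dict.empty
  (vip_passes.foldl
    (fun (st : PySem.Set String × Int) p =>
      if PySem.Set.contains st.1 p then st
      else (PySem.Set.add st.1 p, st.2 + counts.getD p 0))
    (PySem.Set.empty, 0)).2

-- ===== PRECONDITION & SPEC =====
def Spec_num_VIP_guests (vip_passes : List String) (guests : List String) (out : Int) : Prop := out = num_VIP_guests_alt vip_passes guests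
instance (vip_passes : List String) (guests : List String) (out : Int) : Decidable (Spec_num_VIP_guests vip_passes guests out) := by unfold Spec_num_VIP_guests; infer_instance

-- ===== CLAIM (what is proved, stated in full; the proofs are below) =====
def Claim_equal_num_VIP_guests : Prop := ∀ (vip_passes : List String) (guests : List String), Dom_num_VIP_guests vip_passes guests → Spec_num_VIP_guests vip_passes guests (num_VIP_guests vip_passes guests)

-- ===== LEMMAS AND PROOFS =====

theorem contains_eq_decide (s : PySem.Set String) (x : String) :
    PySem.Set.contains s x = decide (x ∈ s) := by
  by_cases h : x ∈ s <;> simp [h]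

-- A's guest loop is a countP.
theorem foldA_countP (S : PySem.Set String) (g : List String) (acc : Int) :
    g.foldl (fun count i => if PySem.Set.contains S i then count + 1 else count) acc
      = acc + (g.countP (fun i => PySem.Set.contains S i) : Int) := by
  induction g generalizing acc with
  | nil => simp
  | cons x xs ih =>
    simp only [List.foldl_cons, List.countP_cons, contains_eq_decide] at ih ⊢
    rw [ih]
    by_cases h : x ∈ S
    · simp [h]; ring
    · simp [h]

-- splitting a countP at one element
theorem countP_split (g : List String) (P Q : String → Bool) (p : String)
    (h : ∀ i, P i = (i == p || Q i)) (hq : Q p = false) :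
    (g.countP P : Int) = g.count p + g.countP Q := by
  induction g with
  | nil => simp
  | cons x xs ih =>
    simp only [List.countP_cons, List.count_cons]
    by_cases hxp : x = p
    · subst hxp
      have hP : P x = true := by simp [h]
      simp [hP, hq, ih]; ring
    · have hb : (x == p) = false := by simp [hxp]
      have hP : P x = Q x := by rw [h x, hb, Bool.false_or]
      by_cases hQ : Q x = true
      · simp [hP, hQ, hxp, ih]; ring
      · simp only [Bool.not_eq_true] at hQ
        simp [hP, hQ, hxp, ih]

-- B's VIP loop accumulates the tallies of guests that occur in vp and are not yet seen.
theorem foldB_invariant (g : List String) (vp : List String) (s : PySem.Set String) (acc : Int) :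
    (vp.foldl
      (fun (st : PySem.Set String × Int) p =>
        if PySem.Set.contains st.1 p then st
        else (PySem.Set.add st.1 p, st.2 + (PySem.Dict.counter g).getD p 0))
      (s, acc)).2
      = acc + (g.countP (fun i => decide (i ∈ vp ∧ i ∉ s)) : Int) := by
  induction vp generalizing s acc with
  | nil => simp
  | cons p vp ih =>
    simp only [List.foldl_cons]
    by_cases hp : p ∈ s
    · rw [if_pos (by simp [hp])]
      rw [ih]
      congr 2
      apply List.countP_congr
      intro i _
      by_cases hip : i = p
      · subst hip; simp [hp]
      · simp [hip]
    · rw [if_neg (by simp [hp])]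
      rw [ih, PySem.Dict.getD_counter]
      have hsplit := countP_split g
        (fun i => decide (i ∈ p :: vp ∧ i ∉ s))
        (fun i => decide (i ∈ vp ∧ i ∉ PySem.Set.add s p)) p
        (by
          intro i
          by_cases hip : i = p
          · subst hip; simp [hp]
          · simp [hip, PySem.Set.mem_add])
        (by simp [PySem.Set.mem_add])
      rw [hsplit]
      ring

-- ===== VERDICT (by name: the statement is the Claim_ definition above) =====
theorem num_VIP_guests_spec : Claim_equal_num_VIP_guests := by
  intro vp g _
  unfold Spec_num_VIP_guests num_VIP_guests num_VIP_guests_alt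
  simp only []
  rw [foldA_countP]
  rw [show g.foldl (fun d x => d.insert x (d.getD x 0 + 1)) PySem.Dict.empty
        = PySem.Dict.counter g from PySem.Dict.foldl_insert_getD_add_one_eq_counter g]
  rw [foldB_invariant]
  congr 2
  apply List.countP_congr
  intro i _
  rw [contains_eq_decide]
  rw [show vp.foldl PySem.Set.add PySem.Set.empty = PySem.Set.ofList vp from
      (PySem.Set.ofList_eq_foldl vp).symm]
  simp [PySem.Set.mem_ofList, PySem.Set.empty]
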